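-- pv_equiv track=rewrite | github.com/Solders-Girdles/GPT-Trader | src/bot_v2/features/live_trade/risk/pre_trade/integration.py | _integration_sequence_index
-- ===== SOURCE A (Python) =====
-- def _integration_sequence_index(order_context: str) -> int:
--     """Extract trailing numeric sequence from integration order context."""
--     digits = ""
--     for char in reversed(order_context or ""):
--         if char.isdigit():
--             digits = char + digits
--         elif digits:
--             break
--     if digits:
--         try:
--             return int(digits)
--         except ValueError:
--             return 0
--     return 0
-- ===== SOURCE B (Python) =====
-- import re
--
-- def _integration_sequence_index(order_context: str) -> int:
--     """Extract trailing numeric sequence from integration order context."""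
--     matches = re.findall(r"\d+", order_context or "")
--     return int(matches[-1]) if matches else 0
-- ===== Notes on version B (the rewrite author's own statement) =====
-- stated objective: idiomatic
-- what changed: Replaces the character-by-character backward scan with a break condition by a single regex findall of all digit runs, returning int of the last run (or 0 if none).
import Mathlib
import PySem

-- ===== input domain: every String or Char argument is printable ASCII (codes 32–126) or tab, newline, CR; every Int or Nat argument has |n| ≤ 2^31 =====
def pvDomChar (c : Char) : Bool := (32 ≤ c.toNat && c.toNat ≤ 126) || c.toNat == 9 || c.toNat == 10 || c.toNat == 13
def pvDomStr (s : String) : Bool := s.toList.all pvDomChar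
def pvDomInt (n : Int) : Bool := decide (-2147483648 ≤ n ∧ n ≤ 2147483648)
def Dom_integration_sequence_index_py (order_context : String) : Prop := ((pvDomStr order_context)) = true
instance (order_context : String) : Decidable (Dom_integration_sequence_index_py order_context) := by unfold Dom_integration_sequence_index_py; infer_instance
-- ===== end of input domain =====

-- B replaces A's backward character scan (with break) by collecting all digit runs
-- left-to-right (re.findall) and taking the last one; objective: idiomatic, same cost.


-- ===== PORT A =====
-- the `for char in reversed(order_context or "")` loop: digits accumulates by prepending,
-- break when a non-digit is met after digits became nonempty.
-- (char.isdigit is PySem.Chars.isdigit, exact on the ASCII domain; `order_context or ""`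
-- is the identity on strings since "" or "" == "".)
def pvGoA (m : List Char) (digits : List Char) : List Char :=
  match m with
  | [] => digits
  | c :: rest =>
    if PySem.Chars.isdigit c then pvGoA rest (c :: digits)
    else if digits ≠ [] then digits
    else pvGoA rest digits

def integration_sequence_index_py (order_context : String) : Int :=
  let digits := pvGoA order_context.toList.reverse []
  if digits ≠ [] then (PySem.Int.ofChars? digits).getD 0 else 0
  -- int(digits) on a nonempty pure-digit string never raises; `.getD 0` is the
  -- `except ValueError: return 0` branch.

-- ===== PORT B =====
-- port of re.findall(r"\d+", s): the maximal digit runs of s, left to right.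
def pvFindallDigits (l : List Char) : List (List Char) :=
  match l with
  | [] => []
  | c :: rest =>
    if PySem.Chars.isdigit c then
      (c :: rest.takeWhile PySem.Chars.isdigit) ::
        pvFindallDigits (rest.dropWhile PySem.Chars.isdigit)
    else pvFindallDigits rest
termination_by l.length
decreasing_by
  · exact Nat.lt_succ_of_le (List.length_dropWhile_le _ _)
  · simp

def integration_sequence_index_py_alt (order_context : String) : Int :=
  let ms := pvFindallDigits order_context.toList
  match ms.getLast? with
  | some r => (PySem.Int.ofChars? r).getD 0   -- int(matches[-1]) never raises on a digit run
  | none => 0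

-- ===== PRECONDITION & SPEC =====
def Spec_integration_sequence_index_py (order_context : String) (out : Int) : Prop := out = integration_sequence_index_py_alt order_context
instance (order_context : String) (out : Int) : Decidable (Spec_integration_sequence_index_py order_context out) := by unfold Spec_integration_sequence_index_py; infer_instance

-- ===== CLAIM (what is proved, stated in full; the proofs are below) =====
def Claim_equal_integration_sequence_index_py : Prop := ∀ (order_context : String), Dom_integration_sequence_index_py order_context → Spec_integration_sequence_index_py order_context (integration_sequence_index_py order_context)

-- ===== LEMMAS AND PROOFS =====

-- collecting phase of A's loop: once digits is nonempty, the loop takes the leading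
-- digit run of the remaining (reversed) input and stops.
theorem pvGoA_ne_nil (m acc : List Char) (h : acc ≠ []) :
    pvGoA m acc = (m.takeWhile PySem.Chars.isdigit).reverse ++ acc := by
  induction m generalizing acc with
  | nil => simp [pvGoA]
  | cons c rest ih =>
    by_cases hc : PySem.Chars.isdigit c
    · simp [pvGoA, hc, ih (c :: acc) (by simp), List.takeWhile_cons_of_pos hc]
    · simp [pvGoA, hc, h, List.takeWhile_cons_of_neg (by simpa using hc)]

theorem pvTakeWhile_append_singleton_false (p : Char → Bool) (s : List Char) (c : Char)
    (hc : p c = false) : (s ++ [c]).takeWhile p = s.takeWhile p := by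
  rw [List.takeWhile_append]; split_ifs with h
  · have hs := List.IsPrefix.eq_of_length (List.takeWhile_prefix p) h
    simp [hc, hs]
  · rfl

theorem pvDropWhile_append_singleton_false (p : Char → Bool) (s : List Char) (c : Char)
    (hc : p c = false) : (s ++ [c]).dropWhile p = s.dropWhile p ++ [c] := by
  rw [List.dropWhile_append]; split_ifs with h
  · simp only [List.isEmpty_iff] at h
    simp [h, hc]
  · rfl

theorem pvTakeWhile_append_of_mem_false (p : Char → Bool) (X Y : List Char)
    (hx : ∃ x ∈ X, p x = false) : (X ++ Y).takeWhile p = X.takeWhile p := by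
  rw [List.takeWhile_append]; split_ifs with h
  · exfalso
    have hX := List.IsPrefix.eq_of_length (List.takeWhile_prefix p) h
    obtain ⟨x, hm, hpx⟩ := hx
    have := List.takeWhile_eq_self_iff.mp hX x hm
    simp [hpx] at this
  · rfl

-- a list ending in a digit has at least one digit run
theorem pvFindall_ne_nil (v : List Char) (c : Char)
    (hc : PySem.Chars.isdigit c = true) : pvFindallDigits (v ++ [c]) ≠ [] := by
  match v with
  | [] => simp [pvFindallDigits, hc]
  | d :: s =>
    by_cases hd : PySem.Chars.isdigit d
    · simp [pvFindallDigits, hd]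
    · simpa [pvFindallDigits, hd] using pvFindall_ne_nil s c hc
termination_by v.length
decreasing_by simp

-- appending a non-digit does not change the digit runs
theorem pvFindall_append_nondigit (u : List Char) (c : Char)
    (hc : PySem.Chars.isdigit c = false) :
    pvFindallDigits (u ++ [c]) = pvFindallDigits u := by
  match u with
  | [] => simp [pvFindallDigits, hc]
  | d :: s =>
    by_cases hd : PySem.Chars.isdigit d
    · rw [List.cons_append, pvFindallDigits, pvFindallDigits]
      simp only [hd, if_true]
      rw [pvTakeWhile_append_singleton_false _ _ _ hc,
          pvDropWhile_append_singleton_false _ _ _ hc,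
          pvFindall_append_nondigit (s.dropWhile PySem.Chars.isdigit) c hc]
    · rw [List.cons_append, pvFindallDigits, pvFindallDigits]
      simp only [hd, if_false, Bool.false_eq_true]
      exact pvFindall_append_nondigit s c hc
termination_by u.length
decreasing_by
  · exact Nat.lt_succ_of_le (List.length_dropWhile_le _ _)
  · simp

-- appending a digit: the last run of u++[c] is the trailing digit run of u, plus c
theorem pvFindall_append_digit (u : List Char) (c : Char)
    (hc : PySem.Chars.isdigit c = true) :
    (pvFindallDigits (u ++ [c])).getLastD [] =
      (u.reverse.takeWhile PySem.Chars.isdigit).reverse ++ [c] := by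
  match u with
  | [] => simp [pvFindallDigits, hc]
  | d :: s =>
    by_cases hd : PySem.Chars.isdigit d
    · rw [List.cons_append, pvFindallDigits]
      simp only [hd, if_true]
      by_cases hall : s.dropWhile PySem.Chars.isdigit = []
      · have hsall : ∀ x ∈ s, PySem.Chars.isdigit x = true :=
          List.dropWhile_eq_nil_iff.mp hall
        have htw : (s ++ [c]).takeWhile PySem.Chars.isdigit = s ++ [c] :=
          List.takeWhile_eq_self_iff.mpr (by
            intro x hx
            rcases List.mem_append.mp hx with h | h
            · exact hsall x h
            · simp at h; subst h; exact hc)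
        have hdw : (s ++ [c]).dropWhile PySem.Chars.isdigit = [] := by
          rw [List.dropWhile_append]
          simp [hall, hc]
        have hrall : ∀ x ∈ s.reverse ++ [d], PySem.Chars.isdigit x = true := by
          intro x hx
          rcases List.mem_append.mp hx with h | h
          · exact hsall x (List.mem_reverse.mp h)
          · simp at h; subst h; exact hd
        rw [htw, hdw]
        rw [List.reverse_cons, List.takeWhile_eq_self_iff.mpr hrall]
        simp [pvFindallDigits]
      · have hdw : (s ++ [c]).dropWhile PySem.Chars.isdigit =
            s.dropWhile PySem.Chars.isdigit ++ [c] := by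
          rw [List.dropWhile_append]
          simp [List.isEmpty_iff, hall]
        rw [hdw]
        have hne := pvFindall_ne_nil (s.dropWhile PySem.Chars.isdigit) c hc
        obtain ⟨z, hz⟩ := Option.ne_none_iff_exists'.mp
          (mt List.getLast?_eq_none_iff.mp hne)
        have ih := pvFindall_append_digit (s.dropWhile PySem.Chars.isdigit) c hc
        have hhead := List.head_dropWhile_not PySem.Chars.isdigit
          (l := s) (by simpa using hall)
        have hmem : ∃ x ∈ (s.dropWhile PySem.Chars.isdigit).reverse,
            PySem.Chars.isdigit x = false :=
          ⟨_, List.mem_reverse.mpr (List.head_mem _), hhead⟩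
        have hsplit : (d :: s).reverse =
            (s.dropWhile PySem.Chars.isdigit).reverse ++
              ((s.takeWhile PySem.Chars.isdigit).reverse ++ [d]) := by
          have hs : s.reverse = (s.dropWhile PySem.Chars.isdigit).reverse ++
              (s.takeWhile PySem.Chars.isdigit).reverse := by
            rw [← List.reverse_append, List.takeWhile_append_dropWhile]
          rw [List.reverse_cons, hs, List.append_assoc]
        rw [List.getLastD_cons, List.getLastD_eq_getLast?, hz, Option.getD_some]
        rw [List.getLastD_eq_getLast?, hz, Option.getD_some] at ih
        rw [ih, hsplit, pvTakeWhile_append_of_mem_false _ _ _ hmem]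
    · rw [List.cons_append, pvFindallDigits]
      simp only [hd, if_false, Bool.false_eq_true]
      rw [pvFindall_append_digit s c hc, List.reverse_cons,
          pvTakeWhile_append_singleton_false _ _ _ (by simpa using hd)]
termination_by u.length
decreasing_by
  · exact Nat.lt_succ_of_le (List.length_dropWhile_le _ _)
  · simp

-- A's digits string is the last digit run of the input
theorem pvGoA_eq_lastRun (m : List Char) :
    pvGoA m [] = (pvFindallDigits m.reverse).getLastD [] := by
  induction m with
  | nil => simp [pvGoA, pvFindallDigits]
  | cons c rest ih =>
    by_cases hc : PySem.Chars.isdigit c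
    · rw [show (c :: rest).reverse = rest.reverse ++ [c] by simp]
      rw [pvFindall_append_digit _ _ hc]
      simp [pvGoA, hc, pvGoA_ne_nil rest [c] (by simp)]
    · rw [show (c :: rest).reverse = rest.reverse ++ [c] by simp]
      rw [pvFindall_append_nondigit _ _ (by simpa using hc)]
      simpa [pvGoA, hc] using ih

-- ===== VERDICT (by name: the statement is the Claim_ definition above) =====
theorem integration_sequence_index_py_spec : Claim_equal_integration_sequence_index_py := by
  intro s _
  unfold Spec_integration_sequence_index_py integration_sequence_index_py integration_sequence_index_py_alt
  have h := pvGoA_eq_lastRun s.toList.reverse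
  simp only [List.reverse_reverse] at h
  rw [h]
  cases hl : (pvFindallDigits s.toList).getLast? with
  | none => simp [List.getLastD_eq_getLast?, hl]
  | some r =>
    simp only [List.getLastD_eq_getLast?, hl, Option.getD_some]
    by_cases hr : r = []
    · subst hr; rfl  -- int("") raises -> none -> getD 0; A returns 0 directly
    · simp [hr]
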